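-- pv_equiv track=rewrite | github.com/cydmacro/python_base_learing | day05/测评答案/Day5_测评_实操题2_数据处理工具集_v1.py | count_level
-- ===== SOURCE A (Python) =====
-- def count_level(scores):
--     """统计各等级人数"""
--     levels = {'优秀': 0, '良好': 0, '及格': 0, '不及格': 0}
--
--     for score in scores:
--         if score >= 90:
--             levels['优秀'] += 1
--         elif score >= 80:
--             levels['良好'] += 1
--         elif score >= 60:
--             levels['及格'] += 1
--         else:
--             levels['不及格'] += 1
--
--     return levels
-- ===== SOURCE B (Python) =====
-- def count_level(scores):
--     """统计各等级人数"""
--     n90 = sum(1 for s in scores if s >= 90)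
--     n80 = sum(1 for s in scores if s >= 80)
--     n60 = sum(1 for s in scores if s >= 60)
--     return {'优秀': n90, '良好': n80 - n90, '及格': n60 - n80, '不及格': len(scores) - n60}
-- ===== Notes on version B (the rewrite author's own statement) =====
-- stated objective: alternative
-- what changed: Replaces the single-pass if/elif bucket dispatch with three cumulative threshold counts (how many scores are >=90, >=80, >=60) whose differences give the four grade counts; no per-element branching into buckets at all.
import Mathlib
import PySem

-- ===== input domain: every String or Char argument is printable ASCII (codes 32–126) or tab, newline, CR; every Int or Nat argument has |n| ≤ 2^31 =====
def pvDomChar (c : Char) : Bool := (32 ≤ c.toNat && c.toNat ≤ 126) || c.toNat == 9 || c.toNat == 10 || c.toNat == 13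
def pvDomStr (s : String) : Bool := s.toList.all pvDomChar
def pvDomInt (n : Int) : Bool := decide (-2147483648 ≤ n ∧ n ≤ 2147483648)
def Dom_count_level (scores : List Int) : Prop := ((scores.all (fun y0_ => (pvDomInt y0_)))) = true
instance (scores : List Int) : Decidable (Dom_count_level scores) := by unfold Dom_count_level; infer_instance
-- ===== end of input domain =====

-- B replaces A's if/elif bucket dispatch with three cumulative threshold counts whose differences give the four grade counts (alternative algorithm, same cost).


-- ===== PORT A =====
-- the body of A's for-loop (the if/elif cascade updating the dict in place)
def count_level_step (d : PySem.Dict String Int) (score : Int) : PySem.Dict String Int :=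
  if score ≥ 90 then d.modify "优秀" 0 (· + 1)
  else if score ≥ 80 then d.modify "良好" 0 (· + 1)
  else if score ≥ 60 then d.modify "及格" 0 (· + 1)
  else d.modify "不及格" 0 (· + 1)

def count_level (scores : List Int) : List (String × Int) :=
  let levels : PySem.Dict String Int :=
    PySem.Dict.ofList [("优秀", 0), ("良好", 0), ("及格", 0), ("不及格", 0)]
  let levels := scores.foldl count_level_step levels
  levels.items

-- ===== PORT B =====
-- B: three cumulative threshold counts (sum(1 for s in scores if s >= t)), then differences
def count_level_alt (scores : List Int) : List (String × Int) :=
  let n90 : Int := (scores.countP (fun s => decide (s ≥ 90)) : Nat)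
  let n80 : Int := (scores.countP (fun s => decide (s ≥ 80)) : Nat)
  let n60 : Int := (scores.countP (fun s => decide (s ≥ 60)) : Nat)
  [("优秀", n90), ("良好", n80 - n90), ("及格", n60 - n80),
   ("不及格", (scores.length : Int) - n60)]

-- ===== PRECONDITION & SPEC =====
def Spec_count_level (scores : List Int) (out : List (String × Int)) : Prop := out = count_level_alt scores
instance (scores : List Int) (out : List (String × Int)) : Decidable (Spec_count_level scores out) := by unfold Spec_count_level; infer_instance

-- ===== CLAIM (what is proved, stated in full; the proofs are below) =====
def Claim_equal_count_level : Prop := ∀ (scores : List Int), Dom_count_level scores → Spec_count_level scores (count_level scores)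

-- ===== LEMMAS AND PROOFS =====

lemma stepA_90 (a b c d x : Int) (h : x ≥ 90) :
    count_level_step (PySem.Dict.mk [("优秀", a), ("良好", b), ("及格", c), ("不及格", d)]) x
      = PySem.Dict.mk [("优秀", a + 1), ("良好", b), ("及格", c), ("不及格", d)] := by
  simp [count_level_step, if_pos h, PySem.Dict.modify, PySem.Dict.insert, PySem.Dict.getD,
    PySem.Dict.get?, PySem.Dict.contains]

lemma stepA_80 (a b c d x : Int) (h1 : ¬ x ≥ 90) (h2 : x ≥ 80) :
    count_level_step (PySem.Dict.mk [("优秀", a), ("良好", b), ("及格", c), ("不及格", d)]) x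
      = PySem.Dict.mk [("优秀", a), ("良好", b + 1), ("及格", c), ("不及格", d)] := by
  simp [count_level_step, if_neg h1, if_pos h2, PySem.Dict.modify, PySem.Dict.insert,
    PySem.Dict.getD, PySem.Dict.get?, PySem.Dict.contains]

lemma stepA_60 (a b c d x : Int) (h1 : ¬ x ≥ 90) (h2 : ¬ x ≥ 80) (h3 : x ≥ 60) :
    count_level_step (PySem.Dict.mk [("优秀", a), ("良好", b), ("及格", c), ("不及格", d)]) x
      = PySem.Dict.mk [("优秀", a), ("良好", b), ("及格", c + 1), ("不及格", d)] := by
  simp [count_level_step, if_neg h1, if_neg h2, if_pos h3, PySem.Dict.modify, PySem.Dict.insert,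
    PySem.Dict.getD, PySem.Dict.get?, PySem.Dict.contains]

lemma stepA_lo (a b c d x : Int) (h1 : ¬ x ≥ 90) (h2 : ¬ x ≥ 80) (h3 : ¬ x ≥ 60) :
    count_level_step (PySem.Dict.mk [("优秀", a), ("良好", b), ("及格", c), ("不及格", d)]) x
      = PySem.Dict.mk [("优秀", a), ("良好", b), ("及格", c), ("不及格", d + 1)] := by
  simp [count_level_step, if_neg h1, if_neg h2, if_neg h3, PySem.Dict.modify, PySem.Dict.insert,
    PySem.Dict.getD, PySem.Dict.get?, PySem.Dict.contains]

-- Loop invariant: A's fold from accumulators (a,b,c,d) ends with each value raised by the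
-- count of scores in that bucket, expressed via the cumulative threshold counts B uses.
lemma count_level_loop_inv (scores : List Int) (a b c d : Int) :
    (scores.foldl count_level_step
      (PySem.Dict.mk [("优秀", a), ("良好", b), ("及格", c), ("不及格", d)])).items
    = [("优秀", a + (scores.countP (fun s => decide (s ≥ 90)) : Int)),
       ("良好", b + ((scores.countP (fun s => decide (s ≥ 80)) : Int)
                    - (scores.countP (fun s => decide (s ≥ 90)) : Int))),
       ("及格", c + ((scores.countP (fun s => decide (s ≥ 60)) : Int)
                    - (scores.countP (fun s => decide (s ≥ 80)) : Int))),
       ("不及格", d + ((scores.length : Int)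
                    - (scores.countP (fun s => decide (s ≥ 60)) : Int)))] := by
  induction scores generalizing a b c d with
  | nil => simp
  | cons x xs ih =>
    simp only [List.foldl_cons, List.countP_cons, List.length_cons]
    by_cases h90 : x ≥ 90
    · rw [stepA_90 a b c d x h90, ih]
      have h80 : x ≥ 80 := by omega
      have h60 : x ≥ 60 := by omega
      simp [h90, h80, h60]; push_cast; omega
    · by_cases h80 : x ≥ 80
      · rw [stepA_80 a b c d x h90 h80, ih]
        have h60 : x ≥ 60 := by omega
        simp [h90, h80, h60]; push_cast; omega
      · by_cases h60 : x ≥ 60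
        · rw [stepA_60 a b c d x h90 h80 h60, ih]
          simp [h90, h80, h60]; push_cast; omega
        · rw [stepA_lo a b c d x h90 h80 h60, ih]
          simp [h90, h80, h60]; push_cast; omega

-- ===== VERDICT (by name: the statement is the Claim_ definition above) =====
theorem count_level_spec : Claim_equal_count_level := by
  intro scores _
  unfold Spec_count_level count_level count_level_alt
  have hstart : PySem.Dict.ofList [("优秀", (0:Int)), ("良好", 0), ("及格", 0), ("不及格", 0)]
      = PySem.Dict.mk [("优秀", 0), ("良好", 0), ("及格", 0), ("不及格", 0)] := by decide
  simp only [hstart, count_level_loop_inv, zero_add]
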